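-- pv_equiv track=rewrite | github.com/nicholasgabai/portmap-ai | core_engine/network_control.py | _parse_darwin_gateway
-- ===== SOURCE A (Python) =====
-- def _parse_darwin_gateway(output: str) -> dict[str, str] | None:
--     gateway = ""
--     interface = ""
--     for line in output.splitlines():
--         stripped = line.strip()
--         if stripped.startswith("gateway:"):
--             gateway = stripped.split(":", 1)[1].strip()
--         elif stripped.startswith("interface:"):
--             interface = stripped.split(":", 1)[1].strip()
--     if gateway or interface:
--         return {"gateway_ip": gateway, "interface": interface, "source": "route get default"}
--     return None
-- ===== SOURCE B (Python) =====
-- def _parse_darwin_gateway(output: str) -> dict[str, str] | None: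
--     table = {}
--     for line in output.splitlines():
--         parts = line.strip().split(":", 1)
--         if len(parts) == 2:
--             table[parts[0]] = parts[1].strip()
--     gateway = table.get("gateway", "")
--     interface = table.get("interface", "")
--     if gateway or interface:
--         return {"gateway_ip": gateway, "interface": interface, "source": "route get default"}
--     return None
-- ===== Notes on version B (the rewrite author's own statement) =====
-- stated objective: idiomatic
-- what changed: B replaces A's two hard-coded state variables and per-key startswith branches by a generic one-pass key/value table (split each line once at its first colon, last occurrence wins) followed by two dictionary lookups.
import Mathlib
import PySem

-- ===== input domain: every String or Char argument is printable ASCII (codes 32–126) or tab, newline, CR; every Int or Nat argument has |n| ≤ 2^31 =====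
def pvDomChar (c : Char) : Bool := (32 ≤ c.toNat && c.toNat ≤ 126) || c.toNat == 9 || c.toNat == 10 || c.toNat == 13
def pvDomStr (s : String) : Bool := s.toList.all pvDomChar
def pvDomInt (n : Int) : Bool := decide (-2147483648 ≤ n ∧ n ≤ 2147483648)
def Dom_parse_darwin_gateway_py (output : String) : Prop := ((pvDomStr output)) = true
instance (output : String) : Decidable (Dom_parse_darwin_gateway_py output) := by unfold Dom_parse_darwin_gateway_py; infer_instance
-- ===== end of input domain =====

-- B replaces A's hard-coded two-variable scan by a generic key/value table built in one pass
-- and two lookups afterwards (objective: idiomatic; same cost). Return value only; no mutation.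

-- ===== PORT A =====
-- one loop iteration of A: update the (gateway, interface) pair from one line
def pdgA_step (st : String × String) (line : String) : String × String :=
  let stripped := PySem.Str.strip line
  if PySem.Str.startswith stripped "gateway:" then
    (PySem.Str.strip (((PySem.Str.splitMax? stripped ":" 1).getD []).getD 1 ""), st.2)
  else if PySem.Str.startswith stripped "interface:" then
    (st.1, PySem.Str.strip (((PySem.Str.splitMax? stripped ":" 1).getD []).getD 1 ""))
  else st

def parse_darwin_gateway_py (output : String) : Option (List (String × String)) :=
  let st := (PySem.Str.splitlines output).foldl pdgA_step ("", "")
  if st.1 ≠ "" ∨ st.2 ≠ "" then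
    some [("gateway_ip", st.1), ("interface", st.2), ("source", "route get default")]
  else none

-- ===== PORT B =====
-- one loop iteration of B: record key → stripped value for any line containing ':'
def pdgB_step (d : PySem.Dict String String) (line : String) : PySem.Dict String String :=
  let parts := (PySem.Str.splitMax? (PySem.Str.strip line) ":" 1).getD []
  if parts.length = 2 then d.insert (parts.getD 0 "") (PySem.Str.strip (parts.getD 1 "")) else d

def parse_darwin_gateway_py_alt (output : String) : Option (List (String × String)) :=
  let d := (PySem.Str.splitlines output).foldl pdgB_step PySem.Dict.empty
  let gateway := d.getD "gateway" ""
  let interface := d.getD "interface" ""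
  if gateway ≠ "" ∨ interface ≠ "" then
    some [("gateway_ip", gateway), ("interface", interface), ("source", "route get default")]
  else none

-- ===== PRECONDITION & SPEC =====
def Spec_parse_darwin_gateway_py (output : String) (out : Option (List (String × String))) : Prop := out = parse_darwin_gateway_py_alt output
instance (output : String) (out : Option (List (String × String))) : Decidable (Spec_parse_darwin_gateway_py output out) := by unfold Spec_parse_darwin_gateway_py; infer_instance

-- ===== CLAIM (what is proved, stated in full; the proofs are below) =====
def Claim_equal_parse_darwin_gateway_py : Prop := ∀ (output : String), Dom_parse_darwin_gateway_py output → Spec_parse_darwin_gateway_py output (parse_darwin_gateway_py output)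

-- ===== LEMMAS AND PROOFS =====

-- splitOnMax's worker with 0 splits left returns the remainder as one last piece
lemma pdg_go_zero (fuel : Nat) (l cur : List Char) (acc : List (List Char))
    (h : l.length < fuel) :
    PySem.Chars.splitOnMax.go [':'] fuel 0 l cur acc = ((cur.reverse ++ l) :: acc).reverse := by
  cases fuel with
  | zero => omega
  | succ f =>
    cases l with
    | nil =>
      rw [PySem.Chars.splitOnMax.go]
      all_goals simp
    | cons c rest =>
      rw [PySem.Chars.splitOnMax.go]
      all_goals simp

-- splitOnMax's worker with 1 split left: split at the first ':' if any
lemma pdg_go_one (fuel : Nat) : ∀ (l cur : List Char) (acc : List (List Char)),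
    l.length < fuel →
    PySem.Chars.splitOnMax.go [':'] fuel 1 l cur acc =
      if ':' ∈ l then
        acc.reverse ++ [cur.reverse ++ l.takeWhile (· != ':'), (l.dropWhile (· != ':')).tail]
      else acc.reverse ++ [cur.reverse ++ l] := by
  induction fuel with
  | zero => intro l cur acc h; omega
  | succ f ih =>
    intro l cur acc h
    cases l with
    | nil =>
      rw [PySem.Chars.splitOnMax.go]
      all_goals simp
    | cons c rest =>
      rw [PySem.Chars.splitOnMax.go]
      rw [if_neg (show ¬((1:Nat) = 0) by omega)]
      by_cases hc : c = ':'
      · subst hc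
        have hpre : [':'].isPrefixOf (':' :: rest) = true := by simp [List.isPrefixOf]
        rw [if_pos hpre, show (1:Nat) - 1 = 0 from rfl,
          show List.drop [':'].length (':' :: rest) = rest from rfl,
          pdg_go_zero f rest [] _ (by simp at h; omega)]
        simp
      · have hpre : [':'].isPrefixOf (c :: rest) = false := by
          simp [List.isPrefixOf]
          exact fun hcc => absurd hcc.symm hc
        rw [hpre]
        simp only [Bool.false_eq_true, if_false]
        rw [ih rest (c :: cur) acc (by simp at h; omega)]
        have ht : (c :: rest).takeWhile (· != ':') = c :: rest.takeWhile (· != ':') := by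
          simp [hc]
        have hd : (c :: rest).dropWhile (· != ':') = rest.dropWhile (· != ':') := by
          simp [hc]
        rw [ht, hd]
        have hor : (':' = c) = False := by
          simp only [eq_iff_iff, iff_false]
          exact fun hcc => absurd hcc.symm hc
        simp only [List.mem_cons, hor, false_or]
        split_ifs <;> simp

-- split(":", 1) on a char list: the piece before the first ':' and the rest, or the whole string
lemma pdg_splitColon (cs : List Char) :
    PySem.Chars.splitOnMax cs [':'] 1 =
      if ':' ∈ cs then [cs.takeWhile (· != ':'), (cs.dropWhile (· != ':')).tail] else [cs] := by
  rw [PySem.Chars.splitOnMax]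
  rw [if_neg (by omega)]
  rw [show ((1 : Int).toNat) = 1 from rfl]
  rw [pdg_go_one (cs.length + 1) cs [] [] (by omega)]
  split_ifs <;> simp

-- "p:" is a prefix of cs  ↔  cs contains ':' and the text before its first ':' is exactly p
lemma pdg_pref_iff (p : List Char) (hp : ':' ∉ p) : ∀ cs : List Char,
    ((p ++ [':']) <+: cs ↔ (':' ∈ cs ∧ cs.takeWhile (· != ':') = p)) := by
  induction p with
  | nil =>
    intro cs
    cases cs with
    | nil => simp
    | cons c rest =>
      constructor
      · rintro ⟨s, hs⟩
        simp only [List.nil_append, List.singleton_append, List.cons.injEq] at hs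
        obtain ⟨rfl, rfl⟩ := hs
        simp
      · rintro ⟨hmem, htw⟩
        by_cases hc : c = ':'
        · subst hc; exact ⟨rest, rfl⟩
        · rw [List.takeWhile_cons, if_pos (by simp [hc])] at htw
          simp at htw
  | cons a p ih =>
    have ha : a ≠ ':' := by
      intro hcon
      exact hp (by simp [hcon])
    have hp' : ':' ∉ p := fun hcon => hp (List.mem_cons_of_mem _ hcon)
    intro cs
    cases cs with
    | nil => simp
    | cons c rest =>
      by_cases hc : c = a
      · subst hc
        rw [List.cons_append, List.cons_prefix_cons]
        rw [List.takeWhile_cons, if_pos (by simp [ha])]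
        have hor : (':' = c) = False := by
          simp only [eq_iff_iff, iff_false]
          exact fun hcon => absurd hcon.symm ha
        simp only [List.mem_cons, hor, false_or, List.cons.injEq, true_and]
        exact ih hp' rest
      · constructor
        · rintro h
          rw [List.cons_append, List.cons_prefix_cons] at h
          exact absurd h.1.symm hc
        · rintro ⟨hmem, htw⟩
          by_cases hcc : c = ':'
          · rw [List.takeWhile_cons, if_neg (by simp [hcc])] at htw
            simp at htw
          · rw [List.takeWhile_cons, if_pos (by simp [hcc])] at htw
            exact absurd (List.cons.inj htw).1 hc

-- the parts both ports compute, reduced to the char-level split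
lemma pdg_parts_eq (t : String) :
    (PySem.Str.splitMax? t ":" 1).getD [] =
      (PySem.Chars.splitOnMax t.toList [':'] 1).map String.ofList := by
  rw [PySem.Str.splitMax?]
  rw [show (":" : String).toList = [':'] from rfl]
  rw [PySem.Chars.splitMax?]
  simp

-- startswith "k:" on t, phrased through the split's first part
lemma pdg_starts_iff (t : String) (k : String) (hk : ':' ∉ k.toList) :
    PySem.Str.startswith t (k ++ ":") = true ↔
      (':' ∈ t.toList ∧ t.toList.takeWhile (· != ':') = k.toList) := by
  rw [PySem.Str.startswith_eq, PySem.Chars.startswith_iff]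
  rw [show (k ++ ":").toList = k.toList ++ [':'] by simp]
  exact pdg_pref_iff k.toList hk t.toList

-- one line: A's pair update matches B's dict update, seen through the two lookups
lemma pdg_step_eq (line : String) (d : PySem.Dict String String) :
    pdgA_step (d.getD "gateway" "", d.getD "interface" "") line =
      ((pdgB_step d line).getD "gateway" "", (pdgB_step d line).getD "interface" "") := by
  simp only [pdgA_step, pdgB_step]
  generalize PySem.Str.strip line = t
  rw [pdg_parts_eq t, pdg_splitColon t.toList]
  by_cases h : ':' ∈ t.toList
  · rw [if_pos h]
    simp only [List.map_cons, List.map_nil, List.length_cons, List.length_nil,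
      List.getD_cons_zero, List.getD_cons_succ]
    have hg := pdg_starts_iff t "gateway" (by decide)
    have hi := pdg_starts_iff t "interface" (by decide)
    rw [show ("gateway" : String) ++ ":" = "gateway:" from rfl] at hg
    rw [show ("interface" : String) ++ ":" = "interface:" from rfl] at hi
    by_cases hbg : t.toList.takeWhile (· != ':') = ("gateway" : String).toList
    · rw [if_pos (hg.2 ⟨h, hbg⟩)]
      simp only [if_true]
      have hkey : String.ofList (t.toList.takeWhile (· != ':')) = "gateway" := by
        rw [hbg]; exact String.ofList_toList
      rw [hkey]
      rw [PySem.Dict.getD_insert, PySem.Dict.getD_insert]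
      simp
    · have hng : PySem.Str.startswith t "gateway:" ≠ true := by
        intro hcon; exact hbg (hg.1 hcon).2
      rw [if_neg hng]
      by_cases hbi : t.toList.takeWhile (· != ':') = ("interface" : String).toList
      · rw [if_pos (hi.2 ⟨h, hbi⟩)]
        simp only [if_true]
        have hkey : String.ofList (t.toList.takeWhile (· != ':')) = "interface" := by
          rw [hbi]; exact String.ofList_toList
        rw [hkey]
        rw [PySem.Dict.getD_insert, PySem.Dict.getD_insert]
        simp
      · have hni : PySem.Str.startswith t "interface:" ≠ true := by
          intro hcon; exact hbi (hi.1 hcon).2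
        rw [if_neg hni]
        simp only [if_true]
        rw [PySem.Dict.getD_insert, PySem.Dict.getD_insert]
        have hk1 : ("gateway" : String) ≠ String.ofList (t.toList.takeWhile (· != ':')) := by
          intro hcon
          have := congrArg String.toList hcon
          simp only [String.toList_ofList] at this
          exact hbg this.symm
        have hk2 : ("interface" : String) ≠ String.ofList (t.toList.takeWhile (· != ':')) := by
          intro hcon
          have := congrArg String.toList hcon
          simp only [String.toList_ofList] at this
          exact hbi this.symm
        rw [if_neg hk1, if_neg hk2]
  · rw [if_neg h]
    simp only [List.map_cons, List.map_nil, List.length_cons, List.length_nil]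
    have hg : PySem.Str.startswith t "gateway:" ≠ true := by
      intro hcon
      rw [show ("gateway:" : String) = "gateway" ++ ":" from rfl] at hcon
      exact h ((pdg_starts_iff t "gateway" (by decide)).1 hcon).1
    have hi : PySem.Str.startswith t "interface:" ≠ true := by
      intro hcon
      rw [show ("interface:" : String) = "interface" ++ ":" from rfl] at hcon
      exact h ((pdg_starts_iff t "interface" (by decide)).1 hcon).1
    rw [if_neg hg, if_neg hi, if_neg (by omega)]

-- the whole loop: A's pair is always the two lookups in B's table
lemma pdg_loop_inv : ∀ (lines : List String) (d : PySem.Dict String String),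
    lines.foldl pdgA_step (d.getD "gateway" "", d.getD "interface" "") =
      ((lines.foldl pdgB_step d).getD "gateway" "", (lines.foldl pdgB_step d).getD "interface" "") := by
  intro lines
  induction lines with
  | nil => intro d; rfl
  | cons line rest ih =>
    intro d
    simp only [List.foldl_cons]
    rw [pdg_step_eq line d]
    exact ih (pdgB_step d line)

-- ===== VERDICT (by name: the statement is the Claim_ definition above) =====
theorem parse_darwin_gateway_py_spec : Claim_equal_parse_darwin_gateway_py := by
  intro output _
  unfold Spec_parse_darwin_gateway_py parse_darwin_gateway_py parse_darwin_gateway_py_alt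
  have h := pdg_loop_inv (PySem.Str.splitlines output) PySem.Dict.empty
  simp only [PySem.Dict.getD_empty] at h
  rw [h]
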